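-- pv_equiv track=rewrite | github.com/Grinnling/Holistic-Transparency-Memory-Engine | memory_system/core/advanced_orchestration_functions.py | count_domain_keywords
-- ===== SOURCE A (Python) =====
-- def count_domain_keywords(query):
--     """Count domain keywords to assess complexity"""
--     domains = {
--         'tech': ['code', 'programming', 'software', 'database', 'server'],
--         'business': ['revenue', 'customers', 'market', 'sales', 'strategy'],
--         'design': ['ui', 'ux', 'layout', 'visual', 'interface'],
--         'operations': ['deployment', 'monitoring', 'infrastructure', 'scaling']
--     }
--
--     query_lower = query.lower()
--     domain_count = 0
--
--     for domain_name, keywords in domains.items():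
--         if any(keyword in query_lower for keyword in keywords):
--             domain_count += 1
--
--     return domain_count
-- ===== SOURCE B (Python) =====
-- def count_domain_keywords(query):
--     """Count domain keywords to assess complexity"""
--     keyword_domain = [
--         ('code', 'tech'), ('programming', 'tech'), ('software', 'tech'),
--         ('database', 'tech'), ('server', 'tech'),
--         ('revenue', 'business'), ('customers', 'business'), ('market', 'business'),
--         ('sales', 'business'), ('strategy', 'business'),
--         ('ui', 'design'), ('ux', 'design'), ('layout', 'design'),
--         ('visual', 'design'), ('interface', 'design'),
--         ('deployment', 'operations'), ('monitoring', 'operations'),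
--         ('infrastructure', 'operations'), ('scaling', 'operations'),
--     ]
--     q = query.lower()
--     return len({domain for keyword, domain in keyword_domain if keyword in q})
-- ===== Notes on version B (the rewrite author's own statement) =====
-- stated objective: idiomatic
-- what changed: Replaces the per-domain any()-counter over a dict of keyword lists with a single flat pass: a literal (keyword, domain) pair list and a set comprehension collecting the domains of matching keywords, returning the set's size.
import Mathlib
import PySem

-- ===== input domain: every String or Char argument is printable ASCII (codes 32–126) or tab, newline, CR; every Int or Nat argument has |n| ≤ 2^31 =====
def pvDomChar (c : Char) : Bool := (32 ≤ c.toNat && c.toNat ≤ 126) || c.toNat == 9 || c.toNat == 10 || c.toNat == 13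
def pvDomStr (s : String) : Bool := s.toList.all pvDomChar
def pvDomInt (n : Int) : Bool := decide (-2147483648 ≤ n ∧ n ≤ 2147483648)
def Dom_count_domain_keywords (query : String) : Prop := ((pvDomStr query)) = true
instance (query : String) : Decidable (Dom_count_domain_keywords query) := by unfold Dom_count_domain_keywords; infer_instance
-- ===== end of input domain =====

-- B replaces A's per-domain any()-counter over a dict of keyword lists with one flat pass over a
-- literal (keyword, domain) pair list, collecting the matched domains in a set (idiomatic; same cost).

-- ===== PORT A =====
def count_domain_keywords (query : String) : Int :=
  let domains : PySem.Dict String (List String) :=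
    PySem.Dict.ofList
      [("tech", ["code", "programming", "software", "database", "server"]),
       ("business", ["revenue", "customers", "market", "sales", "strategy"]),
       ("design", ["ui", "ux", "layout", "visual", "interface"]),
       ("operations", ["deployment", "monitoring", "infrastructure", "scaling"])]
  let query_lower := PySem.Str.lower query
  -- for domain_name, keywords in domains.items(): if any(...): domain_count += 1
  domains.items.foldl
    (fun domain_count p =>
      if p.2.any (fun keyword => PySem.Str.isIn keyword query_lower) then domain_count + 1
      else domain_count)
    0

-- ===== PORT B =====
def count_domain_keywords_alt (query : String) : Int :=
  let keyword_domain : List (String × String) :=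
    [("code", "tech"), ("programming", "tech"), ("software", "tech"),
     ("database", "tech"), ("server", "tech"),
     ("revenue", "business"), ("customers", "business"), ("market", "business"),
     ("sales", "business"), ("strategy", "business"),
     ("ui", "design"), ("ux", "design"), ("layout", "design"),
     ("visual", "design"), ("interface", "design"),
     ("deployment", "operations"), ("monitoring", "operations"),
     ("infrastructure", "operations"), ("scaling", "operations")]
  let q := PySem.Str.lower query
  -- {domain for keyword, domain in keyword_domain if keyword in q}
  (PySem.Set.len
    (keyword_domain.foldl
      (fun acc kd => if PySem.Str.isIn kd.1 q then PySem.Set.add acc kd.2 else acc)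
      PySem.Set.empty) : Int)

-- ===== PRECONDITION & SPEC =====
def Spec_count_domain_keywords (query : String) (out : Int) : Prop := out = count_domain_keywords_alt query
instance (query : String) (out : Int) : Decidable (Spec_count_domain_keywords query out) := by unfold Spec_count_domain_keywords; infer_instance

-- ===== CLAIM (what is proved, stated in full; the proofs are below) =====
def Claim_equal_count_domain_keywords : Prop := ∀ (query : String), Dom_count_domain_keywords query → Spec_count_domain_keywords query (count_domain_keywords query)

-- ===== LEMMAS AND PROOFS =====

-- one domain's segment of B's flat keyword pass: it adds `name` iff some keyword matches
theorem pv_segment' (q name : String) (kws : List String) (s : PySem.Set String) :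
    (kws.map (fun kw => (kw, name))).foldl
        (fun acc kd => if PySem.Str.isIn kd.1 q then PySem.Set.add acc kd.2 else acc) s
      = if kws.any (fun kw => PySem.Str.isIn kw q) then PySem.Set.add s name else s := by
  induction kws generalizing s with
  | nil => simp
  | cons k rest ih =>
    simp only [List.map_cons, List.foldl_cons, List.any_cons]
    by_cases hk : PySem.Str.isIn k q = true
    · have hk2 : PySem.Chars.isIn k.toList q.toList = true := by simpa using hk
      rw [if_pos hk, ih]
      simp [hk2]
    · have hk2 : PySem.Chars.isIn k.toList q.toList = false := by simpa using hk
      rw [if_neg hk, ih]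
      simp [hk2]

theorem pv_main (query : String) :
    count_domain_keywords query = count_domain_keywords_alt query := by
  show ((if ["code", "programming", "software", "database", "server"].any
        (fun kw => PySem.Str.isIn kw (PySem.Str.lower query)) = true then (0 : Int) + 1 else 0)
    |> fun c => (if ["revenue", "customers", "market", "sales", "strategy"].any
        (fun kw => PySem.Str.isIn kw (PySem.Str.lower query)) = true then c + 1 else c)
    |> fun c => (if ["ui", "ux", "layout", "visual", "interface"].any
        (fun kw => PySem.Str.isIn kw (PySem.Str.lower query)) = true then c + 1 else c)
    |> fun c => (if ["deployment", "monitoring", "infrastructure", "scaling"].any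
        (fun kw => PySem.Str.isIn kw (PySem.Str.lower query)) = true then c + 1 else c))
    = ((PySem.Set.len
        ((["code", "programming", "software", "database", "server"].map (fun kw => (kw, "tech"))
          ++ ["revenue", "customers", "market", "sales", "strategy"].map (fun kw => (kw, "business"))
          ++ ["ui", "ux", "layout", "visual", "interface"].map (fun kw => (kw, "design"))
          ++ ["deployment", "monitoring", "infrastructure", "scaling"].map (fun kw => (kw, "operations"))).foldl
          (fun acc kd => if PySem.Str.isIn kd.1 (PySem.Str.lower query) then PySem.Set.add acc kd.2 else acc)
          PySem.Set.empty)) : Int)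
  rw [List.foldl_append, List.foldl_append, List.foldl_append,
    pv_segment', pv_segment', pv_segment', pv_segment']
  by_cases h1 : ["code", "programming", "software", "database", "server"].any
      (fun kw => PySem.Str.isIn kw (PySem.Str.lower query)) = true <;>
  by_cases h2 : ["revenue", "customers", "market", "sales", "strategy"].any
      (fun kw => PySem.Str.isIn kw (PySem.Str.lower query)) = true <;>
  by_cases h3 : ["ui", "ux", "layout", "visual", "interface"].any
      (fun kw => PySem.Str.isIn kw (PySem.Str.lower query)) = true <;>
  by_cases h4 : ["deployment", "monitoring", "infrastructure", "scaling"].any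
      (fun kw => PySem.Str.isIn kw (PySem.Str.lower query)) = true <;>
  simp only [h1, h2, h3, h4, if_true] <;> simp

-- ===== VERDICT (by name: the statement is the Claim_ definition above) =====
theorem count_domain_keywords_spec : Claim_equal_count_domain_keywords := by
  intro query _
  exact pv_main query
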